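-- pv_equiv track=rewrite | github.com/MrOdd-Use/Auto_Research_Engine | multi_agents/agents/utils/output_writers.py | _parse_evidence_from_md
-- ===== SOURCE A (Python) =====
-- from typing import Any, Dict, List, Optional
--
-- def _parse_evidence_from_md(md_text: str) -> List[dict]:
--     """Parse existing evidence.md back into a list of dicts (URL + content only)."""
--     entries: List[dict] = []
--     current: Dict[str, str] = {}
--     for line in md_text.splitlines():
--         if line.startswith("### ["):
--             if current:
--                 entries.append(current)
--             current = {}
--         elif line.startswith("- **URL**:"):
--             current["source_url"] = line[len("- **URL**:"):].strip()
--         elif line.startswith("- **Domain**:"):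
--             current["domain"] = line[len("- **Domain**:"):].strip()
--         elif line.startswith("- **Content**:"):
--             current["content"] = line[len("- **Content**:"):].strip()
--     if current:
--         entries.append(current)
--     return entries
-- ===== SOURCE B (Python) =====
-- from typing import Dict, List
--
-- _FIELDS = [
--     ("source_url", "- **URL**:"),
--     ("domain", "- **Domain**:"),
--     ("content", "- **Content**:"),
-- ]
--
-- def _parse_evidence_from_md(md_text: str) -> List[dict]:
--     """Group lines into blocks at '### [' headers, then parse each block into a dict."""
--     blocks: List[List[str]] = [[]]
--     for line in md_text.splitlines():
--         if line.startswith("### ["):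
--             blocks.append([])
--         else:
--             blocks[-1].append(line)
--     entries: List[Dict[str, str]] = []
--     for block in blocks:
--         d: Dict[str, str] = {}
--         for line in block:
--             for key, prefix in _FIELDS:
--                 if line.startswith(prefix):
--                     d[key] = line[len(prefix):].strip()
--                     break
--         if d:
--             entries.append(d)
--     return entries
-- ===== Notes on version B (the rewrite author's own statement) =====
-- stated objective: alternative
-- what changed: Replaces A's single accumulator-flush loop (current dict flushed into entries at each header and at EOF) with a two-phase group-then-parse decomposition: partition the lines into blocks at header lines, parse each block into a dict via a field-prefix table, and keep the non-empty dicts.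
import Mathlib
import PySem

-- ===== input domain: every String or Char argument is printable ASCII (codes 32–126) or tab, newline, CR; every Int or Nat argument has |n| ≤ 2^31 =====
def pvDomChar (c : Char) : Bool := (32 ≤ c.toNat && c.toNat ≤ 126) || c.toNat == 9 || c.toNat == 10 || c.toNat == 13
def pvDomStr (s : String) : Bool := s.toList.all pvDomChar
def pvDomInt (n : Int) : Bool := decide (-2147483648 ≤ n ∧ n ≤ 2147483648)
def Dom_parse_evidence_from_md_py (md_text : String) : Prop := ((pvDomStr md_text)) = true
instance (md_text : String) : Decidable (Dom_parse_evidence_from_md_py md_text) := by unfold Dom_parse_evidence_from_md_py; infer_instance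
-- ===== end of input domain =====

-- B replaces A's single accumulator-flush loop by a group-then-parse decomposition (partition
-- lines into blocks at header lines, parse each block into a dict, keep non-empty dicts);
-- objective: alternative decomposition, same cost.

-- ===== PORT A =====
def pvStepA (st : List (PySem.Dict String String) × PySem.Dict String String) (line : String) :
    List (PySem.Dict String String) × PySem.Dict String String :=
  if PySem.Str.startswith line "### [" then
    ((if st.2.items ≠ [] then st.1 ++ [st.2] else st.1), PySem.Dict.empty)
  else if PySem.Str.startswith line "- **URL**:" then
    (st.1, st.2.insert "source_url" (PySem.Str.strip (PySem.Str.slice line (some (PySem.Str.len "- **URL**:" : Int)) none)))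
  else if PySem.Str.startswith line "- **Domain**:" then
    (st.1, st.2.insert "domain" (PySem.Str.strip (PySem.Str.slice line (some (PySem.Str.len "- **Domain**:" : Int)) none)))
  else if PySem.Str.startswith line "- **Content**:" then
    (st.1, st.2.insert "content" (PySem.Str.strip (PySem.Str.slice line (some (PySem.Str.len "- **Content**:" : Int)) none)))
  else st

def parse_evidence_from_md_py (md_text : String) : List (List (String × String)) :=
  let r := (PySem.Str.splitlines md_text).foldl pvStepA ([], PySem.Dict.empty)
  (if r.2.items ≠ [] then r.1 ++ [r.2] else r.1).map (·.items)

-- ===== PORT B =====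
def pvFields : List (String × String) :=
  [("source_url", "- **URL**:"), ("domain", "- **Domain**:"), ("content", "- **Content**:")]

-- the inner 'for key, prefix in _FIELDS: … break' loop of Source B
def pvSetField : List (String × String) → PySem.Dict String String → String → PySem.Dict String String
  | [], d, _ => d
  | (k, p) :: rest, d, line =>
      if PySem.Str.startswith line p then
        d.insert k (PySem.Str.strip (PySem.Str.slice line (some (PySem.Str.len p : Int)) none))
      else pvSetField rest d line

def parse_evidence_from_md_py_alt (md_text : String) : List (List (String × String)) :=
  let blocks := (PySem.Str.splitlines md_text).foldl
    (fun bs line =>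
      if PySem.Str.startswith line "### [" then bs ++ [[]]
      else bs.dropLast ++ [(bs.getLastD []) ++ [line]]) [[]]
  let entries := blocks.foldl
    (fun es b =>
      let d := b.foldl (fun d line => pvSetField pvFields d line) PySem.Dict.empty
      if d.items ≠ [] then es ++ [d] else es) []
  entries.map (·.items)

-- ===== PRECONDITION & SPEC =====
def Spec_parse_evidence_from_md_py (md_text : String) (out : List (List (String × String))) : Prop := out = parse_evidence_from_md_py_alt md_text
instance (md_text : String) (out : List (List (String × String))) : Decidable (Spec_parse_evidence_from_md_py md_text out) := by unfold Spec_parse_evidence_from_md_py; infer_instance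

-- ===== CLAIM (what is proved, stated in full; the proofs are below) =====
def Claim_equal_parse_evidence_from_md_py : Prop := ∀ (md_text : String), Dom_parse_evidence_from_md_py md_text → Spec_parse_evidence_from_md_py md_text (parse_evidence_from_md_py md_text)

-- ===== LEMMAS AND PROOFS =====

-- common specification of the per-block result, parsing the open block starting from dict `cur`
def pvSpecB (cur : PySem.Dict String String) : List String → List (PySem.Dict String String)
  | [] => if cur.items ≠ [] then [cur] else []
  | l :: ls =>
      if PySem.Str.startswith l "### [" then
        (if cur.items ≠ [] then [cur] else []) ++ pvSpecB PySem.Dict.empty ls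
      else pvSpecB (pvSetField pvFields cur l) ls

-- blocks of B's partition pass, with open block `cur`
def pvBlocksRec (cur : List String) : List String → List (List String)
  | [] => [cur]
  | l :: ls =>
      if PySem.Str.startswith l "### [" then cur :: pvBlocksRec [] ls
      else pvBlocksRec (cur ++ [l]) ls

lemma pvA_spec (lines : List String) :
    ∀ (es : List (PySem.Dict String String)) (cur : PySem.Dict String String),
      (let r := lines.foldl pvStepA (es, cur);
        if r.2.items ≠ [] then r.1 ++ [r.2] else r.1) = es ++ pvSpecB cur lines := by
  induction lines with
  | nil =>
      intro es cur
      simp only [List.foldl_nil, pvSpecB]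
      split <;> simp
  | cons l ls ih =>
      intro es cur
      simp only [List.foldl_cons, pvSpecB]
      by_cases h : PySem.Str.startswith l "### [" = true
      · simp at h
        simp only [pvStepA]
        simp [h, ih]
        split <;> simp
      · simp at h
        have hstep : pvStepA (es, cur) l = (es, pvSetField pvFields cur l) := by
          simp only [pvStepA, pvFields, pvSetField]
          simp [h]
          split_ifs <;> rfl
        simp [h, hstep, ih]

lemma pvBlocks_fold (lines : List String) :
    ∀ (done : List (List String)) (cur : List String),
      lines.foldl
        (fun bs line =>
          if PySem.Str.startswith line "### [" then bs ++ [[]]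
          else bs.dropLast ++ [(bs.getLastD []) ++ [line]]) (done ++ [cur])
      = done ++ pvBlocksRec cur lines := by
  induction lines with
  | nil => intro done cur; simp [pvBlocksRec]
  | cons l ls ih =>
      intro done cur
      simp only [List.foldl_cons, pvBlocksRec]
      by_cases h : PySem.Str.startswith l "### [" = true
      · rw [if_pos h, if_pos h]
        have := ih (done ++ [cur]) []
        simpa using this
      · rw [if_neg h, if_neg h, List.dropLast_concat, List.getLastD_concat]
        exact ih done (cur ++ [l])

lemma pvEntries_fold (lines : List String) :
    ∀ (cur : List String) (es : List (PySem.Dict String String)),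
      (pvBlocksRec cur lines).foldl
        (fun es b =>
          let d := b.foldl (fun d line => pvSetField pvFields d line) PySem.Dict.empty
          if d.items ≠ [] then es ++ [d] else es) es
      = es ++ pvSpecB (cur.foldl (fun d line => pvSetField pvFields d line) PySem.Dict.empty) lines := by
  induction lines with
  | nil =>
      intro cur es
      simp only [pvBlocksRec, List.foldl_cons, List.foldl_nil, pvSpecB]
      split <;> simp
  | cons l ls ih =>
      intro cur es
      simp only [pvBlocksRec, pvSpecB]
      by_cases h : PySem.Str.startswith l "### [" = true
      · rw [if_pos h, if_pos h]
        simp only [List.foldl_cons]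
        rw [ih]
        simp only [List.foldl_nil]
        split <;> simp
      · rw [if_neg h, if_neg h]
        rw [ih]
        simp [List.foldl_append]

-- ===== VERDICT (by name: the statement is the Claim_ definition above) =====
theorem parse_evidence_from_md_py_spec : Claim_equal_parse_evidence_from_md_py := by
  intro md_text _
  unfold Spec_parse_evidence_from_md_py
  unfold parse_evidence_from_md_py parse_evidence_from_md_py_alt
  have hA := pvA_spec (PySem.Str.splitlines md_text) [] PySem.Dict.empty
  have hB := pvBlocks_fold (PySem.Str.splitlines md_text) [] []
  simp only [List.nil_append] at hA hB
  simp only [hA, hB]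
  have hE := pvEntries_fold (PySem.Str.splitlines md_text) [] []
  simp only [List.foldl_nil, List.nil_append] at hE
  simp only [hE]
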